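-- pv_equiv track=rewrite | github.com/oss-esso/OQI-UC002-DWave | generate_report_visuals.py | count_actual_1hot_violations
-- ===== SOURCE A (Python) =====
-- def count_actual_1hot_violations(sol_dict: dict) -> int:
--     """Count Plots with >1 crop assigned (Y>0.5) from solution_plantations.
--
--     The validator counters are unreliable at larger scales; this function
--     directly inspects the solution to find actual one-hot violations.
--     Key format: Y_PatchX_CropName (split on '_' with maxsplit=2).
--     """
--     sp = sol_dict.get("solution_plantations", {})
--     if not sp:
--         return 0
--     patch_counts: dict[str, int] = {}
--     for key, val in sp.items():
--         parts = key.split("_", 2)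
--         if len(parts) < 2:
--             continue
--         patch = parts[1]
--         try:
--             if float(val) > 0.5:
--                 patch_counts[patch] = patch_counts.get(patch, 0) + 1
--         except (TypeError, ValueError):
--             pass
--     return sum(1 for cnt in patch_counts.values() if cnt > 1)
-- ===== SOURCE B (Python) =====
-- def count_actual_1hot_violations(sol_dict: dict) -> int:
--     """Collect qualifying patch names, sort them, then count duplicate runs in one scan."""
--     sp = sol_dict.get("solution_plantations", {})
--     if not sp:
--         return 0
--     patches = []
--     for key, val in sp.items():
--         parts = key.split("_", 2)
--         if len(parts) < 2:
--             continue
--         try: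
--             if float(val) > 0.5:
--                 patches.append(parts[1])
--         except (TypeError, ValueError):
--             pass
--     patches.sort()
--     violations = 0
--     prev = None
--     counted = False
--     for p in patches:
--         if p == prev and not counted:
--             violations += 1
--             counted = True
--         elif p != prev:
--             prev = p
--             counted = False
--     return violations
-- ===== Notes on version B (the rewrite author's own statement) =====
-- stated objective: alternative
-- what changed: Replaces A's incrementally built patch->count dictionary plus aggregation over its values by staged passes: collect the qualifying patch names into a list, sort it, and count runs of length >= 2 in one linear scan over the sorted list.
import Mathlib
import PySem

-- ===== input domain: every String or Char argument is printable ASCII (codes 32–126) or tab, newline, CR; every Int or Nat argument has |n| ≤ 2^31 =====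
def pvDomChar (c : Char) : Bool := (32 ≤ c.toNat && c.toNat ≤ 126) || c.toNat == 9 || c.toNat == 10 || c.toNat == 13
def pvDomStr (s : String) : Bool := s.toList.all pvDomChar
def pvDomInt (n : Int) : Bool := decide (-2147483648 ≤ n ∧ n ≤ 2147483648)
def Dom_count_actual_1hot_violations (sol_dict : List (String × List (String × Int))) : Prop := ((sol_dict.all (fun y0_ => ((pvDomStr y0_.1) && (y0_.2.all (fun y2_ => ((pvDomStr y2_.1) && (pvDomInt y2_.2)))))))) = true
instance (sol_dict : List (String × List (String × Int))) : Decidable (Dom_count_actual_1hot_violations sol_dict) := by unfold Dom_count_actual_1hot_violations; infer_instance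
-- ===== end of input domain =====

-- B trades A's patch->count dict + value-aggregation pass for sort-then-scan: collect the
-- qualifying patch names, sort them, and count duplicate runs in one linear scan (alternative).


-- ===== PORT A =====
-- literal port of A: build a patch->count dict, then sum 1 over values > 1.
-- float(val) > 0.5 on an int val is exactly 0 < val; the try/except never fires on ints.
def count_actual_1hot_violations (sol_dict : List (String × List (String × Int))) : Int :=
  let sp : List (String × Int) := (PySem.Dict.mk sol_dict).getD "solution_plantations" []
  if sp.isEmpty then 0
  else
    let patch_counts : PySem.Dict String Int :=
      sp.foldl (fun d kv =>
        let parts := (PySem.Str.splitMax? kv.1 "_" 2).getD []   -- sep "_" ≠ "": always some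
        if parts.length < 2 then d
        else
          match PySem.List.pyGet? parts 1 with
          | none => d        -- unreachable: parts.length ≥ 2
          | some patch =>
            if (0:Int) < kv.2 then d.insert patch (d.getD patch 0 + 1) else d)
        PySem.Dict.empty
    ((patch_counts.values.filter (fun cnt => 1 < cnt)).map (fun _ => (1 : Int))).sum

-- ===== PORT B =====
-- literal port of Source B: collect qualifying patches, sort, count duplicate runs in one scan.
-- prev = None is modelled by Option String (a string never equals None).
def count_actual_1hot_violations_alt (sol_dict : List (String × List (String × Int))) : Int :=
  let sp : List (String × Int) := (PySem.Dict.mk sol_dict).getD "solution_plantations" []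
  if sp.isEmpty then 0
  else
    let patches : List String :=
      sp.foldl (fun acc kv =>
        let parts := (PySem.Str.splitMax? kv.1 "_" 2).getD []
        if parts.length < 2 then acc
        else
          match PySem.List.pyGet? parts 1 with
          | none => acc      -- unreachable: parts.length ≥ 2
          | some patch => if (0:Int) < kv.2 then acc ++ [patch] else acc)
        []
    let sortedPatches := PySem.List.sorted patches (fun x => x) false
    let st := sortedPatches.foldl (fun (st : Option String × Bool × Int) p =>
        if st.1 = some p ∧ st.2.1 = false then (st.1, true, st.2.2 + 1)
        else if st.1 ≠ some p then (some p, false, st.2.2)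
        else st) (none, false, 0)
    st.2.2

-- ===== PRECONDITION & SPEC =====
-- Pre_ excludes association lists with duplicate keys (outer or inner), on which the Python
-- dict built from them collapses the duplicates while the list representation keeps all
-- pairs; which pairs survive is an artefact of the representation, not of A's algorithm.
def Pre_count_actual_1hot_violations (sol_dict : List (String × List (String × Int))) : Prop :=
  (sol_dict.map Prod.fst).Nodup ∧ ∀ p ∈ sol_dict, (p.2.map Prod.fst).Nodup
instance (sol_dict : List (String × List (String × Int))) : Decidable (Pre_count_actual_1hot_violations sol_dict) := by unfold Pre_count_actual_1hot_violations; infer_instance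
def pvWitness_count_actual_1hot_violations : (List (String × List (String × Int))) :=
  [("solution_plantations", [("Y_P1_Wheat", 1), ("Y_P1_Corn", 1), ("Y_P2_Corn", 1)])]
def Spec_count_actual_1hot_violations (sol_dict : List (String × List (String × Int))) (out : Int) : Prop := out = count_actual_1hot_violations_alt sol_dict
instance (sol_dict : List (String × List (String × Int))) (out : Int) : Decidable (Spec_count_actual_1hot_violations sol_dict out) := by unfold Spec_count_actual_1hot_violations; infer_instance

-- ===== CLAIM (what is proved, stated in full; the proofs are below) =====
def Claim_equal_count_actual_1hot_violations : Prop := ∀ (sol_dict : List (String × List (String × Int))), Dom_count_actual_1hot_violations sol_dict → Pre_count_actual_1hot_violations sol_dict → Spec_count_actual_1hot_violations sol_dict (count_actual_1hot_violations sol_dict)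

-- ===== LEMMAS AND PROOFS =====
-- the common key→patch extraction both loops perform on each (key, val) item
def pvExtract (kv : String × Int) : Option String :=
  let parts := (PySem.Str.splitMax? kv.1 "_" 2).getD []
  if parts.length < 2 then none
  else
    match PySem.List.pyGet? parts 1 with
    | none => none
    | some patch => if (0:Int) < kv.2 then some patch else none

-- the number of distinct patches occurring at least twice in l (what both programs compute)
def pvD (l : List String) : Nat :=
  (PySem.Set.ofList l).countP (fun x => decide (2 ≤ l.count x))

-- B's run-scan step (literally the lambda in count_actual_1hot_violations_alt)
def pvStep (st : Option String × Bool × Int) (p : String) : Option String × Bool × Int :=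
  if st.1 = some p ∧ st.2.1 = false then (st.1, true, st.2.2 + 1)
  else if st.1 ≠ some p then (some p, false, st.2.2)
  else st

-- a fold whose body fires only when pvExtract succeeds is a fold over the filterMap
theorem pv_foldl_extract {γ : Type} (step : γ → String → γ) (init : γ) (l : List (String × Int)) :
    l.foldl (fun s kv => match pvExtract kv with | some y => step s y | none => s) init
      = (l.filterMap pvExtract).foldl step init := by
  induction l generalizing init with
  | nil => rfl
  | cons a l ih => cases h : pvExtract a <;> simp [h, ih]

theorem pv_A_body (d : PySem.Dict String Int) (kv : String × Int) :
    (let parts := (PySem.Str.splitMax? kv.1 "_" 2).getD []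
     if parts.length < 2 then d
     else
       match PySem.List.pyGet? parts 1 with
       | none => d
       | some patch => if (0:Int) < kv.2 then d.insert patch (d.getD patch 0 + 1) else d)
    = match pvExtract kv with
      | some y => d.insert y (d.getD y 0 + 1)
      | none => d := by
  unfold pvExtract
  simp only []
  split
  · rfl
  · split
    · simp_all
    · simp_all
      split <;> rfl

theorem pv_B_body (acc : List String) (kv : String × Int) :
    (let parts := (PySem.Str.splitMax? kv.1 "_" 2).getD []
     if parts.length < 2 then acc
     else
       match PySem.List.pyGet? parts 1 with
       | none => acc
       | some patch => if (0:Int) < kv.2 then acc ++ [patch] else acc)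
    = match pvExtract kv with
      | some y => acc ++ [y]
      | none => acc := by
  unfold pvExtract
  simp only []
  split
  · rfl
  · split
    · simp_all
    · simp_all
      split <;> rfl

theorem pv_A_fold (sp : List (String × Int)) :
    sp.foldl (fun (d : PySem.Dict String Int) kv =>
        let parts := (PySem.Str.splitMax? kv.1 "_" 2).getD []
        if parts.length < 2 then d
        else
          match PySem.List.pyGet? parts 1 with
          | none => d
          | some patch =>
            if (0:Int) < kv.2 then d.insert patch (d.getD patch 0 + 1) else d)
      PySem.Dict.empty
    = PySem.Dict.counter (sp.filterMap pvExtract) := by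
  have h : (fun (d : PySem.Dict String Int) (kv : String × Int) =>
        let parts := (PySem.Str.splitMax? kv.1 "_" 2).getD []
        if parts.length < 2 then d
        else
          match PySem.List.pyGet? parts 1 with
          | none => d
          | some patch =>
            if (0:Int) < kv.2 then d.insert patch (d.getD patch 0 + 1) else d)
      = fun d kv => match pvExtract kv with
        | some y => d.insert y (d.getD y 0 + 1)
        | none => d :=
    funext fun d => funext fun kv => pv_A_body d kv
  rw [h, pv_foldl_extract]
  exact PySem.Dict.foldl_insert_getD_add_one_eq_counter _

-- A's aggregation over the counter's values is pvD
theorem pv_A_count (ps : List String) :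
    (((PySem.Dict.counter ps).values.filter (fun cnt => (1:Int) < cnt)).map
        (fun _ => (1 : Int))).sum = ((pvD ps : Nat) : Int) := by
  rw [PySem.List.sum_map_const_int]
  have hv : (PySem.Dict.counter ps).values
      = (PySem.Set.ofList ps).map (fun k => ((ps.count k : Int))) := by
    have h := PySem.Dict.items_counter (κ := String) ps
    simp only [PySem.Dict.values, h, List.map_map]
    rfl
  have hcp : List.countP ((fun cnt => decide ((1:Int) < cnt)) ∘ fun k => ((ps.count k : Int)))
      (PySem.Set.ofList ps) = List.countP (fun k => decide (2 ≤ ps.count k)) (PySem.Set.ofList ps) := by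
    apply List.countP_congr
    intro x _
    constructor <;> intro h <;> simp_all <;> omega
  rw [hv, ← List.countP_eq_length_filter, List.countP_map, hcp, mul_one]
  rfl

-- B's collection loop builds exactly the filterMap of pvExtract
theorem pv_B_fold (sp : List (String × Int)) :
    sp.foldl (fun (acc : List String) kv =>
        let parts := (PySem.Str.splitMax? kv.1 "_" 2).getD []
        if parts.length < 2 then acc
        else
          match PySem.List.pyGet? parts 1 with
          | none => acc
          | some patch => if (0:Int) < kv.2 then acc ++ [patch] else acc)
      []
    = sp.filterMap pvExtract := by
  have h : (fun (acc : List String) (kv : String × Int) =>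
        let parts := (PySem.Str.splitMax? kv.1 "_" 2).getD []
        if parts.length < 2 then acc
        else
          match PySem.List.pyGet? parts 1 with
          | none => acc
          | some patch => if (0:Int) < kv.2 then acc ++ [patch] else acc)
      = fun acc kv => match pvExtract kv with
        | some y => acc ++ [y]
        | none => acc :=
    funext fun acc => funext fun kv => pv_B_body acc kv
  rw [h, pv_foldl_extract]
  induction sp.filterMap pvExtract using List.reverseRecOn with
  | nil => rfl
  | append_singleton l x ih => simp [ih]

-- pvD is invariant under permutation
theorem pvD_perm {l₁ l₂ : List String} (h : l₁.Perm l₂) : pvD l₁ = pvD l₂ := by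
  unfold pvD
  have hperm : (PySem.Set.ofList l₁).Perm (PySem.Set.ofList l₂) := by
    refine (List.perm_ext_iff_of_nodup (PySem.Set.nodup_ofList _) (PySem.Set.nodup_ofList _)).mpr ?_
    intro x
    rw [PySem.Set.mem_ofList, PySem.Set.mem_ofList]
    exact ⟨fun hx => h.mem_iff.mp hx, fun hx => h.mem_iff.mpr hx⟩
  rw [hperm.countP_eq]
  apply List.countP_congr
  intro x _
  simp [h.count_eq]

-- run-scan state lemmas: after a non-matching prev the scan behaves as if prev were None
theorem pv_res_reset (l : List String) (a : String) (c : Bool) (v : Int) (h : a ∉ l) :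
    (l.foldl pvStep (some a, c, v)).2.2 = (l.foldl pvStep (none, false, v)).2.2 := by
  cases l with
  | nil => rfl
  | cons p t =>
    have hpa : p ≠ a := fun he => h (he ▸ List.mem_cons_self)
    have hap : a ≠ p := fun he => hpa he.symm
    have h1 : pvStep (some a, c, v) p = (some p, false, v) := by
      simp [pvStep, hap]
    have h2 : pvStep (none, false, v) p = (some p, false, v) := by simp [pvStep]
    simp [List.foldl_cons, h1, h2]

theorem pv_res_run_counted (k : Nat) (a : String) (rest : List String) (h : a ∉ rest) (v : Int) :
    ((List.replicate k a ++ rest).foldl pvStep (some a, true, v)).2.2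
      = (rest.foldl pvStep (none, false, v)).2.2 := by
  induction k with
  | zero => simpa using pv_res_reset rest a true v h
  | succ k ih =>
    have hstep : pvStep (some a, true, v) a = (some a, true, v) := by simp [pvStep]
    simpa [List.replicate_succ, List.foldl_cons, hstep] using ih

theorem pv_res_run (k : Nat) (a : String) (rest : List String) (h : a ∉ rest) (v : Int) :
    ((List.replicate k a ++ rest).foldl pvStep (some a, false, v)).2.2
      = (rest.foldl pvStep (none, false, v + if 1 ≤ k then 1 else 0)).2.2 := by
  cases k with
  | zero => simpa using pv_res_reset rest a false v h
  | succ k =>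
    have hstep : pvStep (some a, false, v) a = (some a, true, v + 1) := by simp [pvStep]
    simpa [List.replicate_succ, List.foldl_cons, hstep] using pv_res_run_counted k a rest h (v + 1)

-- counting: one run of a followed by the remainder
theorem pvD_cons_run (a : String) (k : Nat) (rest : List String) (h : a ∉ rest) :
    pvD (a :: (List.replicate k a ++ rest)) = (if 1 ≤ k then 1 else 0) + pvD rest := by
  unfold pvD
  set l := a :: (List.replicate k a ++ rest) with hl
  have hcnt_a : l.count a = k + 1 := by
    simp [hl, List.count_cons_self, List.count_append, List.count_replicate,
      List.count_eq_zero.mpr h]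
  have hcnt_ne : ∀ x, x ≠ a → l.count x = rest.count x := by
    intro x hx
    have hax : a ≠ x := fun he => hx he.symm
    simp [hl, List.count_cons, List.count_append, List.count_replicate, hax]
  have hnodup : (a :: PySem.Set.ofList rest).Nodup := by
    refine List.nodup_cons.mpr ⟨?_, PySem.Set.nodup_ofList rest⟩
    rw [PySem.Set.mem_ofList]; exact h
  have hperm : (PySem.Set.ofList l).Perm (a :: PySem.Set.ofList rest) := by
    refine (List.perm_ext_iff_of_nodup (PySem.Set.nodup_ofList _) hnodup).mpr ?_
    intro x
    simp [hl, PySem.Set.mem_ofList, List.mem_replicate, or_comm]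
    tauto
  rw [hperm.countP_eq, List.countP_cons]
  have hpa : (decide (2 ≤ l.count a)) = (decide (1 ≤ k)) := by
    rw [hcnt_a]; by_cases hk : 1 ≤ k <;> simp [hk] <;> omega
  have hrest : List.countP (fun x => decide (2 ≤ l.count x)) (PySem.Set.ofList rest)
      = List.countP (fun x => decide (2 ≤ rest.count x)) (PySem.Set.ofList rest) := by
    apply List.countP_congr
    intro x hx
    have hxa : x ≠ a := fun he => h (he ▸ (PySem.Set.mem_ofList rest x).mp hx)
    rw [hcnt_ne x hxa]
  rw [hpa, hrest]
  by_cases hk : 1 ≤ k <;> simp [hk] <;> omega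

-- the run scan over a sorted list computes pvD
theorem pv_res_sorted (n : Nat) : ∀ (l : List String), l.length ≤ n → l.Pairwise (· ≤ ·) →
    ∀ v : Int, (l.foldl pvStep (none, false, v)).2.2 = v + ((pvD l : Nat) : Int) := by
  induction n with
  | zero =>
    intro l hlen _ v
    have : l = [] := List.length_eq_zero_iff.mp (Nat.le_zero.mp hlen)
    subst this
    simp [pvD, PySem.Set.ofList]
  | succ n ih =>
    intro l hlen hs v
    match l with
    | [] => simp [pvD, PySem.Set.ofList]
    | a :: t =>
      have ha_le : ∀ x ∈ t, a ≤ x := (List.pairwise_cons.mp hs).1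
      have ht_pw : t.Pairwise (· ≤ ·) := (List.pairwise_cons.mp hs).2
      set k := (t.takeWhile (fun x => x == a)).length with hk
      set rest := t.dropWhile (fun x => x == a) with hrest
      have htw : t.takeWhile (fun x => x == a) = List.replicate k a := by
        rw [List.eq_replicate_iff]
        refine ⟨rfl, fun b hb => ?_⟩
        have := List.mem_takeWhile_imp hb
        exact eq_of_beq this
      have ht : t = List.replicate k a ++ rest := by
        rw [← htw, hrest, List.takeWhile_append_dropWhile]
      have hrest_sub : rest.Sublist t := by
        rw [hrest]; exact List.dropWhile_sublist _
      have hrest_pw : rest.Pairwise (· ≤ ·) := ht_pw.sublist hrest_sub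
      have ha_notin : a ∉ rest := by
        intro hmem
        cases hr : rest with
        | nil => rw [hr] at hmem; exact absurd hmem (List.not_mem_nil)
        | cons hd tl =>
          have hhd : ¬ (hd == a) = true := by
            have := List.head?_dropWhile_not (fun x => x == a) t
            rw [← hrest, hr] at this
            simpa using this
          have hhd' : hd ≠ a := fun he => hhd (by simp [he])
          have hhd_t : hd ∈ t := hrest_sub.mem (hr ▸ List.mem_cons_self)
          have h1 : a ≤ hd := ha_le hd hhd_t
          rw [hr] at hmem
          rcases List.mem_cons.mp hmem with he | htl
          · exact hhd' he.symm
          · have h2 : hd ≤ a := by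
              have := (List.pairwise_cons.mp (hr ▸ hrest_pw)).1
              exact this a htl
            exact hhd' (le_antisymm h2 h1)
      have hrest_len : rest.length ≤ n := by
        have h1 : rest.length ≤ t.length := hrest_sub.length_le
        have h2 : t.length ≤ n := by simpa using hlen
        omega
      have hstep : pvStep (none, false, v) a = (some a, false, v) := by simp [pvStep]
      calc ((a :: t).foldl pvStep (none, false, v)).2.2
          = ((List.replicate k a ++ rest).foldl pvStep (some a, false, v)).2.2 := by
            rw [List.foldl_cons, hstep, ← ht]
        _ = (rest.foldl pvStep (none, false, v + if 1 ≤ k then 1 else 0)).2.2 :=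
            pv_res_run k a rest ha_notin v
        _ = v + (if 1 ≤ k then 1 else 0) + ((pvD rest : Nat) : Int) :=
            ih rest hrest_len hrest_pw _
        _ = v + ((pvD (a :: t) : Nat) : Int) := by
            rw [ht, pvD_cons_run a k rest ha_notin]
            by_cases hk1 : 1 ≤ k <;> simp [hk1] <;> push_cast <;> ring

-- ===== VERDICT (by name: the statement is the Claim_ definition above) =====
theorem count_actual_1hot_violations_spec : Claim_equal_count_actual_1hot_violations := by
  intro sol_dict _ _
  unfold Spec_count_actual_1hot_violations count_actual_1hot_violations count_actual_1hot_violations_alt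
  simp only []
  by_cases hsp : ((PySem.Dict.mk sol_dict).getD "solution_plantations" []).isEmpty
  · simp [hsp]
  · rw [if_neg (by simp [hsp]), if_neg (by simp [hsp]), pv_A_fold, pv_B_fold]
    set ps := ((PySem.Dict.mk sol_dict).getD "solution_plantations" []).filterMap pvExtract with hps
    have hfun : (fun (st : Option String × Bool × Int) p =>
        if st.1 = some p ∧ st.2.1 = false then (st.1, true, st.2.2 + 1)
        else if st.1 ≠ some p then (some p, false, st.2.2)
        else st) = pvStep := rfl
    rw [hfun, pv_A_count]
    have hpair : (PySem.List.sorted ps (fun x => x) false).Pairwise (· ≤ ·) := by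
      simpa using PySem.List.sorted_pairwise ps (fun x => x)
    have := pv_res_sorted (PySem.List.sorted ps (fun x => x) false).length
      (PySem.List.sorted ps (fun x => x) false) le_rfl hpair 0
    rw [this, pvD_perm (PySem.List.sorted_perm ps (fun x => x) false)]
    ring
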